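-- pv_equiv track=rewrite | github.com/rayyanshan027/Finley | scripts/run_session_adaptation_experiment.py | resolve_residual_adaptation_rows
-- ===== SOURCE A (Python) =====
-- def resolve_residual_adaptation_rows(
--     model_variant: str,
--     adaptation_rows: list[dict],
-- ) -> list[dict]:
--     if model_variant != "baseline_plus_latest_unit_residual":
--         return list(adaptation_rows)
--     if not adaptation_rows:
--         return []
--     latest_epoch = max(int(row["epoch"]) for row in adaptation_rows)
--     return [row for row in adaptation_rows if int(row["epoch"]) == latest_epoch]
-- ===== SOURCE B (Python) =====
-- def resolve_residual_adaptation_rows(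
--     model_variant: str,
--     adaptation_rows: list[dict],
-- ) -> list[dict]:
--     if model_variant != "baseline_plus_latest_unit_residual":
--         return list(adaptation_rows)
--     if not adaptation_rows:
--         return []
--     groups = {}
--     for row in adaptation_rows:
--         groups.setdefault(int(row["epoch"]), []).append(row)
--     return groups[max(groups)]
-- ===== Notes on version B (the rewrite author's own statement) =====
-- stated objective: alternative
-- what changed: Instead of computing the scalar max epoch and rescanning the list with a filter, B groups rows into a dict keyed by int(row['epoch']) in one pass (insertion order preserved per bucket) and returns the bucket of the maximum key.
import Mathlib
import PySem

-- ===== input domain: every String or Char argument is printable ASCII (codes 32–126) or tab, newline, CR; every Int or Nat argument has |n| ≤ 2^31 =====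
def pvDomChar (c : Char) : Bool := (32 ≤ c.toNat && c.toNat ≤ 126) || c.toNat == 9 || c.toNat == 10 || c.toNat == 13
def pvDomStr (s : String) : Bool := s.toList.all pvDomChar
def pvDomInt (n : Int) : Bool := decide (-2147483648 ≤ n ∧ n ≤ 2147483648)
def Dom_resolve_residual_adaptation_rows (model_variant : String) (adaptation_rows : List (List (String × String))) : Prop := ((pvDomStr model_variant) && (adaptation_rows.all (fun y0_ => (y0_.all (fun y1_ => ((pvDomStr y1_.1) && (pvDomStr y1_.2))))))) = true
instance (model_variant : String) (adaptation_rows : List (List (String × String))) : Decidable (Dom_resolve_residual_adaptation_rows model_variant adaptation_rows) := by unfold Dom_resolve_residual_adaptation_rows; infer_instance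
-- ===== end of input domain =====

-- B groups rows into a dict epoch -> rows (one pass, insertion order) and returns the bucket of the max key,
-- instead of A's scalar max followed by a filter rescan. Equivalence of return values is proved on Pre_.

-- int(row["epoch"]): first-match lookup in the row, then Python int(); none = KeyError/ValueError
def pvEpoch? (row : List (String × String)) : Option Int :=
  ((PySem.Dict.mk row).get? "epoch").bind PySem.Int.ofStr?

-- the epoch value; the default 0 is never used on inputs admitted by Pre_
def pvEpoch (row : List (String × String)) : Int := (pvEpoch? row).getD 0

-- ===== PORT A =====
def resolve_residual_adaptation_rows (model_variant : String) (adaptation_rows : List (List (String × String))) : List (List (String × String)) :=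
  if model_variant ≠ "baseline_plus_latest_unit_residual" then adaptation_rows
  else match adaptation_rows with
    | [] => []
    | r :: rest =>
      let latest_epoch := rest.foldl (fun m x => max m (pvEpoch x)) (pvEpoch r)
      adaptation_rows.filter (fun row => pvEpoch row == latest_epoch)

-- ===== PORT B =====
def resolve_residual_adaptation_rows_alt (model_variant : String) (adaptation_rows : List (List (String × String))) : List (List (String × String)) :=
  if model_variant ≠ "baseline_plus_latest_unit_residual" then adaptation_rows
  else if adaptation_rows.isEmpty then []
  else
    let groups := adaptation_rows.foldl
      (fun d row => d.modify (pvEpoch row) [] (fun l => l ++ [row])) PySem.Dict.empty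
    match PySem.List.max? groups.keys (fun k => k) with
    | some k => groups.getD k []
    | none => []

-- ===== PRECONDITION & SPEC =====
-- Pre_ excludes exactly the inputs where Python A raises: with the special model variant, a row
-- without an "epoch" key (KeyError) or whose "epoch" value int() rejects (ValueError).
def Pre_resolve_residual_adaptation_rows (model_variant : String) (adaptation_rows : List (List (String × String))) : Prop :=
  model_variant = "baseline_plus_latest_unit_residual" →
    ∀ r ∈ adaptation_rows, (pvEpoch? r).isSome = true
instance (model_variant : String) (adaptation_rows : List (List (String × String))) : Decidable (Pre_resolve_residual_adaptation_rows model_variant adaptation_rows) := by unfold Pre_resolve_residual_adaptation_rows; infer_instance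

def pvWitness_resolve_residual_adaptation_rows : String × (List (List (String × String))) :=
  ("baseline_plus_latest_unit_residual", [[("epoch", "1"), ("v", "a")], [("epoch", "2")]])

def Spec_resolve_residual_adaptation_rows (model_variant : String) (adaptation_rows : List (List (String × String))) (out : List (List (String × String))) : Prop := out = resolve_residual_adaptation_rows_alt model_variant adaptation_rows
instance (model_variant : String) (adaptation_rows : List (List (String × String))) (out : List (List (String × String))) : Decidable (Spec_resolve_residual_adaptation_rows model_variant adaptation_rows out) := by unfold Spec_resolve_residual_adaptation_rows; infer_instance

-- ===== CLAIM (what is proved, stated in full; the proofs are below) =====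
def Claim_equal_resolve_residual_adaptation_rows : Prop := ∀ (model_variant : String) (adaptation_rows : List (List (String × String))), Dom_resolve_residual_adaptation_rows model_variant adaptation_rows → Pre_resolve_residual_adaptation_rows model_variant adaptation_rows → Spec_resolve_residual_adaptation_rows model_variant adaptation_rows (resolve_residual_adaptation_rows model_variant adaptation_rows)

-- ===== LEMMAS AND PROOFS =====

-- max over the distinct epochs equals the running max over all epochs
theorem pv_max_dedup (xs : List Int) (L : Int) (h : PySem.List.max? xs (fun k => k) = some L) :
    PySem.List.max? (PySem.Set.ofList xs) (fun k => k) = some L := by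
  have hLmem : L ∈ xs := PySem.List.max?_mem h
  have hLmem' : L ∈ PySem.Set.ofList xs := (PySem.Set.mem_ofList xs L).mpr hLmem
  cases hm : PySem.List.max? (PySem.Set.ofList xs) (fun k => k) with
  | none =>
      have : PySem.Set.ofList xs = [] := (PySem.List.max?_eq_none_iff (PySem.Set.ofList xs) (fun k => k)).mp hm
      rw [this] at hLmem'; cases hLmem'
  | some m =>
      have h1 : L ≤ m := PySem.List.max?_isMax hm L hLmem'
      have hmmem : m ∈ xs := (PySem.Set.mem_ofList xs m).mp (PySem.List.max?_mem hm)
      have h2 : m ≤ L := PySem.List.max?_isMax h m hmmem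
      have : m = L := le_antisymm h2 h1
      rw [this]

-- the bucket of key c is exactly A's filter
theorem pv_bucket (rows : List (List (String × String))) (c : Int) :
    (rows.foldl (fun d row => d.modify (pvEpoch row) [] (fun l => l ++ [row])) PySem.Dict.empty).getD c []
      = rows.filter (fun row => pvEpoch row == c) := by
  have h := PySem.Dict.getD_foldl_modify_append
    (l := rows.map (fun row => (pvEpoch row, row))) (d := PySem.Dict.empty) (c := c)
  rw [List.foldl_map] at h
  simp only [h, PySem.Dict.getD_empty, List.nil_append, List.filter_map]
  simp [Function.comp_def]

-- ===== VERDICT (by name: the statement is the Claim_ definition above) =====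
theorem resolve_residual_adaptation_rows_spec : Claim_equal_resolve_residual_adaptation_rows := by
  intro mv rows _ _
  unfold Spec_resolve_residual_adaptation_rows
  unfold resolve_residual_adaptation_rows resolve_residual_adaptation_rows_alt
  by_cases hmv : mv = "baseline_plus_latest_unit_residual"
  · simp only [hmv, ne_eq, not_true_eq_false, if_false]
    cases rows with
    | nil => simp
    | cons r rest =>
      simp only [List.isEmpty_cons, Bool.false_eq_true, if_false]
      -- the running max L
      set L := rest.foldl (fun m x => max m (pvEpoch x)) (pvEpoch r) with hL
      have hmax : PySem.List.max? ((r :: rest).map pvEpoch) (fun k => k) = some L := by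
        rw [List.map_cons, PySem.List.max?_id_cons, List.foldl_map]
      have hkeys : ((r :: rest).foldl
          (fun d row => d.modify (pvEpoch row) [] (fun l => l ++ [row])) PySem.Dict.empty).keys
          = PySem.Set.ofList ((r :: rest).map pvEpoch) := by
        rw [PySem.Dict.keys_foldl_modify_key]
        simp [PySem.Set.update, PySem.Set.ofList_eq_foldl, PySem.Dict.keys_empty]
      rw [hkeys, pv_max_dedup _ L hmax]
      exact (pv_bucket (r :: rest) L).symm
  · simp [hmv]
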